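-- pv_equiv track=rewrite | github.com/EmmaLeonhart/aelaki-wikibot | aelaki/numerals.py | ordinal
-- ===== SOURCE A (Python) =====
-- UNITS_12: list[str] = [
--     "",       # 0 placeholder
--     "Pan",    # 1
--     "Bal",    # 2
--     "Bhan",   # 3
--     "Mal",    # 4
--     "Tan",    # 5
--     "Dal",    # 6
--     "Dhan",   # 7
--     "Nal",    # 8
--     "Kan",    # 9
--     "Gal",    # 10
--     "Ghan",   # 11
--     "Nger",   # 12 (dozen marker)
-- ]
--
-- ORDINALS_12: list[str] = [
--     "",         # 0
--     "Sekon",    # 1st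
--     "Kezon",    # 2nd
--     "Bhalon",   # 3rd
--     "Malon",    # 4th
--     "Talon",    # 5th
--     "Dalon",    # 6th
--     "Dhanon",   # 7th
--     "Nalon",    # 8th
--     "Kanon",    # 9th
--     "Galon",    # 10th
--     "Ghanon",   # 11th
--     "Ngeron",   # 12th
-- ]
--
-- def ordinal(n: int) -> str:
--     """Generate ordinal number name (1st, 2nd, ...)."""
--     if n <= 0:
--         return str(n)
--     if n == 60:
--         return "Vibhisekon"
--     if n <= 12:
--         return ORDINALS_12[n]
--     if n < 60:
--         dozens = n // 12
--         remainder = n % 12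
--         if dozens == 1:
--             head = UNITS_12[12]
--         else:
--             head = UNITS_12[dozens] + UNITS_12[12]
--         if remainder == 0:
--             return head + "on"  # Add ordinal ending
--         return head + ORDINALS_12[remainder]
--     # n > 60
--     sixty_count = n // 60
--     rest = n % 60
--     head = ("" if sixty_count == 1 else ordinal(sixty_count)) + "Vibhi"
--     if rest == 0:
--         return head
--     return head + ordinal(rest)
-- ===== SOURCE B (Python) =====
-- UNITS_12 = ["", "Pan", "Bal", "Bhan", "Mal", "Tan", "Dal", "Dhan", "Nal", "Kan", "Gal", "Ghan", "Nger"]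
--
-- ORDINALS_12 = ["", "Sekon", "Kezon", "Bhalon", "Malon", "Talon", "Dalon", "Dhanon", "Nalon", "Kanon", "Galon", "Ghanon", "Ngeron"]
--
--
-- def _small(n: int) -> str:
--     """Name for n <= 60 (non-recursive)."""
--     if n <= 0:
--         return str(n)
--     if n == 60:
--         return "Vibhisekon"
--     if n <= 12:
--         return ORDINALS_12[n]
--     dozens, remainder = divmod(n, 12)
--     head = UNITS_12[dozens if dozens > 1 else 0] + UNITS_12[12]
--     if remainder == 0:
--         return head + "on"
--     return head + ORDINALS_12[remainder]
--
--
-- def ordinal(n: int) -> str: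
--     """Generate ordinal number name (1st, 2nd, ...)."""
--     if n <= 60:
--         return _small(n)
--     rems = []
--     m = n
--     while m > 60:
--         rems.append(m % 60)
--         m //= 60
--     parts = ["" if m == 1 else _small(m)]
--     for r in reversed(rems):
--         parts.append("Vibhi" + ("" if r == 0 else _small(r)))
--     return "".join(parts)
-- ===== Notes on version B (the rewrite author's own statement) =====
-- stated objective: alternative
-- what changed: Replaced A's double recursion for n > 60 (recursing on both n // 60 and n % 60) with an iterative base-60 decomposition: a loop collects the remainders while m > 60, a non-recursive helper names each base-60 digit, and the parts are joined in one pass.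
import Mathlib
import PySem

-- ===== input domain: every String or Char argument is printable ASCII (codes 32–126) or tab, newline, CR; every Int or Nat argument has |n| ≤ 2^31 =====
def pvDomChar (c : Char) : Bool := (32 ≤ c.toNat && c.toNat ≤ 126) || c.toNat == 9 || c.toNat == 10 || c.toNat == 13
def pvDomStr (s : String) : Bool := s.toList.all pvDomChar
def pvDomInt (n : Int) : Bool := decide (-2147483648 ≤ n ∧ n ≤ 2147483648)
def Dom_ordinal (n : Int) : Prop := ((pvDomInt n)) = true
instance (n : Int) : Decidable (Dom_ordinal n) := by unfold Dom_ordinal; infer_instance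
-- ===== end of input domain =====

-- B re-implements ordinal with an iterative base-60 decomposition (collect remainders, then join
-- the parts) instead of A's double recursion; objective: alternative decomposition, same cost.

-- ===== PORT A =====
def pvUNITS_12 : List String :=
  ["", "Pan", "Bal", "Bhan", "Mal", "Tan", "Dal", "Dhan", "Nal", "Kan", "Gal", "Ghan", "Nger"]

def pvORDINALS_12 : List String :=
  ["", "Sekon", "Kezon", "Bhalon", "Malon", "Talon", "Dalon", "Dhanon", "Nalon", "Kanon",
   "Galon", "Ghanon", "Ngeron"]

-- literal port of A; indices are in range on every executed path, so pyGet? … |>.getD "" is exact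
def ordinal (n : Int) : String :=
  if n ≤ 0 then PySem.Int.toStr n
  else if n = 60 then "Vibhisekon"
  else if n ≤ 12 then (PySem.List.pyGet? pvORDINALS_12 n).getD ""
  else if n < 60 then
    let dozens := PySem.Int.floordiv n 12
    let remainder := PySem.Int.mod n 12
    let head :=
      if dozens = 1 then (PySem.List.pyGet? pvUNITS_12 12).getD ""
      else (PySem.List.pyGet? pvUNITS_12 dozens).getD "" ++ (PySem.List.pyGet? pvUNITS_12 12).getD ""
    if remainder = 0 then head ++ "on"
    else head ++ (PySem.List.pyGet? pvORDINALS_12 remainder).getD ""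
  else
    let sixty_count := PySem.Int.floordiv n 60
    let rest := PySem.Int.mod n 60
    let head := (if sixty_count = 1 then "" else ordinal sixty_count) ++ "Vibhi"
    if rest = 0 then head else head ++ ordinal rest
termination_by n.toNat
decreasing_by
  · have h1 : PySem.Int.floordiv n 60 = n / 60 := PySem.Int.floordiv_eq_ediv_of_pos (by omega)
    omega
  · have h2 : PySem.Int.mod n 60 = n % 60 := PySem.Int.mod_eq_emod_of_pos (by omega)
    omega

-- ===== PORT B =====
-- Source B's _small: the name for n ≤ 60, non-recursive
def pvSmall (n : Int) : String :=
  if n ≤ 0 then PySem.Int.toStr n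
  else if n = 60 then "Vibhisekon"
  else if n ≤ 12 then (PySem.List.pyGet? pvORDINALS_12 n).getD ""
  else
    let dozens := PySem.Int.floordiv n 12
    let remainder := PySem.Int.mod n 12
    let head := (PySem.List.pyGet? pvUNITS_12 (if 1 < dozens then dozens else 0)).getD "" ++
                (PySem.List.pyGet? pvUNITS_12 12).getD ""
    if remainder = 0 then head ++ "on"
    else head ++ (PySem.List.pyGet? pvORDINALS_12 remainder).getD ""

-- Source B's while loop: divide by 60 collecting remainders (appended as in Python) while m > 60
def pvCollect (m : Int) (rems : List Int) : Int × List Int :=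
  if 60 < m then pvCollect (PySem.Int.floordiv m 60) (rems ++ [PySem.Int.mod m 60])
  else (m, rems)
termination_by m.toNat
decreasing_by
  have h1 : PySem.Int.floordiv m 60 = m / 60 := PySem.Int.floordiv_eq_ediv_of_pos (by omega)
  omega

def ordinal_alt (n : Int) : String :=
  if n ≤ 60 then pvSmall n
  else
    let p := pvCollect n []
    let parts := (if p.1 = 1 then "" else pvSmall p.1) ::
      p.2.reverse.map (fun r => "Vibhi" ++ (if r = 0 then "" else pvSmall r))
    PySem.Str.join "" parts

-- ===== PRECONDITION & SPEC =====
def Spec_ordinal (n : Int) (out : String) : Prop := out = ordinal_alt n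
instance (n : Int) (out : String) : Decidable (Spec_ordinal n out) := by unfold Spec_ordinal; infer_instance

-- ===== CLAIM (what is proved, stated in full; the proofs are below) =====
def Claim_equal_ordinal : Prop := ∀ (n : Int), Dom_ordinal n → Spec_ordinal n (ordinal n)

-- ===== LEMMAS AND PROOFS =====

theorem join_empty_nil : PySem.Str.join "" ([] : List String) = "" := by
  simp [PySem.Str.join, PySem.Chars.join_nil]

theorem join_empty_cons (a : String) (l : List String) :
    PySem.Str.join "" (a :: l) = a ++ PySem.Str.join "" l := by
  cases l with
  | nil => simp [PySem.Str.join, PySem.Chars.join_nil, PySem.Chars.join_singleton]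
  | cons b t => simp [PySem.Str.join, PySem.Chars.join_cons_cons]

theorem join_empty_append (l₁ l₂ : List String) :
    PySem.Str.join "" (l₁ ++ l₂) = PySem.Str.join "" l₁ ++ PySem.Str.join "" l₂ := by
  induction l₁ with
  | nil => simp [join_empty_nil]
  | cons a t ih => simp [join_empty_cons, ih, String.append_assoc]

-- B's helper agrees with A on its whole range n ≤ 60
theorem small_eq_ordinal (n : Int) (h : n ≤ 60) : pvSmall n = ordinal n := by
  rw [ordinal, pvSmall]
  by_cases h0 : n ≤ 0
  · simp [h0]
  · by_cases h60 : n = 60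
    · simp [h60]
    · by_cases h12 : n ≤ 12
      · simp [h0, h60, h12]
      · have hlt : n < 60 := by omega
        have hd : PySem.Int.floordiv n 12 = n / 12 := PySem.Int.floordiv_eq_ediv_of_pos (by omega)
        have hd1 : 1 ≤ PySem.Int.floordiv n 12 := by rw [hd]; omega
        have hhead : (PySem.List.pyGet? pvUNITS_12
              (if 1 < PySem.Int.floordiv n 12 then PySem.Int.floordiv n 12 else 0)).getD "" ++
              (PySem.List.pyGet? pvUNITS_12 12).getD "" =
            (if PySem.Int.floordiv n 12 = 1 then (PySem.List.pyGet? pvUNITS_12 12).getD ""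
             else (PySem.List.pyGet? pvUNITS_12 (PySem.Int.floordiv n 12)).getD "" ++
                  (PySem.List.pyGet? pvUNITS_12 12).getD "") := by
          by_cases hone : PySem.Int.floordiv n 12 = 1
          · rw [if_pos hone, if_neg (by omega)]
            rw [show (PySem.List.pyGet? pvUNITS_12 (0 : Int)).getD "" = "" from rfl,
              String.empty_append]
          · rw [if_neg hone, if_pos (by omega)]
        simp only [h0, h60, h12, hlt, ite_false, ite_true, hhead]

-- accumulator law for Source B's remainder loop
theorem collect_acc (k : Nat) : ∀ (m : Int), m.toNat ≤ k → ∀ (acc : List Int),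
    pvCollect m acc = ((pvCollect m []).1, acc ++ (pvCollect m []).2) := by
  induction k with
  | zero =>
    intro m hm acc
    have : ¬ 60 < m := by omega
    rw [pvCollect, if_neg this]
    conv_rhs => rw [pvCollect, if_neg this]
    simp
  | succ k ih =>
    intro m hm acc
    by_cases h : 60 < m
    · have hd : PySem.Int.floordiv m 60 = m / 60 := PySem.Int.floordiv_eq_ediv_of_pos (by omega)
      have hlt : (PySem.Int.floordiv m 60).toNat ≤ k := by omega
      rw [pvCollect, if_pos h, ih _ hlt]
      conv_rhs => rw [pvCollect, if_pos h, ih _ hlt]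
      simp
    · rw [pvCollect, if_neg h]
      conv_rhs => rw [pvCollect, if_neg h]
      simp

-- the loop's assembled string equals A's recursion (with the top-position 1 suppressed)
theorem build_eq (k : Nat) : ∀ (m : Int), m.toNat ≤ k → 1 ≤ m →
    PySem.Str.join "" ((if (pvCollect m []).1 = 1 then "" else pvSmall (pvCollect m []).1) ::
      (pvCollect m []).2.reverse.map (fun r => "Vibhi" ++ (if r = 0 then "" else pvSmall r))) =
    if m = 1 then "" else ordinal m := by
  induction k with
  | zero => intro m hm h1; omega
  | succ k ih =>
    intro m hm h1
    by_cases h : 60 < m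
    · have hd : PySem.Int.floordiv m 60 = m / 60 := PySem.Int.floordiv_eq_ediv_of_pos (by omega)
      have hr : PySem.Int.mod m 60 = m % 60 := PySem.Int.mod_eq_emod_of_pos (by omega)
      have hc1 : 1 ≤ PySem.Int.floordiv m 60 := by omega
      have hck : (PySem.Int.floordiv m 60).toNat ≤ k := by omega
      have hstep : pvCollect m [] =
          ((pvCollect (PySem.Int.floordiv m 60) []).1,
           [PySem.Int.mod m 60] ++ (pvCollect (PySem.Int.floordiv m 60) []).2) := by
        rw [pvCollect, if_pos h]
        exact collect_acc k _ hck _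
      rw [hstep]
      simp only [List.reverse_append, List.reverse_singleton, List.map_append, List.map_cons,
        List.map_nil]
      rw [show ∀ (a : String) (l₁ l₂ : List String), PySem.Str.join "" (a :: (l₁ ++ l₂)) =
            PySem.Str.join "" (a :: l₁) ++ PySem.Str.join "" l₂ by
          intro a l₁ l₂
          rw [join_empty_cons, join_empty_append, join_empty_cons, String.append_assoc]]
      rw [ih _ hck hc1]
      rw [join_empty_cons, join_empty_nil]
      -- unfold A once at m
      conv_rhs => rw [ordinal]
      have h0 : ¬ m ≤ 0 := by omega
      have h60 : ¬ m = 60 := by omega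
      have h12 : ¬ m ≤ 12 := by omega
      have hlt60 : ¬ m < 60 := by omega
      have hm1 : ¬ m = 1 := by omega
      simp only [h0, h60, h12, hlt60, hm1, ite_false]
      by_cases hr0 : PySem.Int.mod m 60 = 0
      · have hdvd : (60 : Int) ∣ m := Int.dvd_of_emod_eq_zero (by omega)
        simp [hdvd, String.append_empty]
      · have hndvd : ¬ (60 : Int) ∣ m := fun hdvd => hr0 (by
          have := Int.emod_emod_of_dvd m (dvd_refl (60 : Int))
          omega)
        have hsm : ordinal (m % 60) = pvSmall (m % 60) :=
          (small_eq_ordinal _ (by omega)).symm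
        simp [hsm, String.append_assoc, show ¬ m % 60 = 0 by omega]
    · -- m ≤ 60: loop body never runs
      have hstop : pvCollect m [] = (m, []) := by rw [pvCollect, if_neg h]
      rw [hstop]
      simp only [List.reverse_nil, List.map_nil]
      rw [join_empty_cons, join_empty_nil, String.append_empty]
      by_cases hm1 : m = 1
      · simp [hm1]
      · simp [hm1, small_eq_ordinal m (by omega)]

-- ===== VERDICT (by name: the statement is the Claim_ definition above) =====
theorem ordinal_spec : Claim_equal_ordinal := by
  intro n _
  unfold Spec_ordinal ordinal_alt
  by_cases h : n ≤ 60
  · simp only [h, if_pos]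
    exact (small_eq_ordinal n h).symm
  · simp only [h, ite_false]
    have := build_eq n.toNat n (le_refl _) (by omega)
    rw [this]
    simp [show ¬ n = 1 by omega]
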